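-- pv_equiv track=rewrite | github.com/Alonbbar6/CvAppGames | flappy_eyebrow.py | get_primary_face
-- ===== SOURCE A (Python) =====
-- def get_primary_face(faces, frame_h, frame_w):
--     primary_face = None
--     max_height = 0
--
--     for face in faces:
--         x1, y1, w, h = face
--         x2, y2 = x1 + w, y1 + h
--
--         if x1 < 0 or y1 < 0 or x2 > frame_w or y2 > frame_h:
--             continue
--
--         if h > max_height:
--             max_height = h
--             primary_face = face
--
--     return primary_face
-- ===== SOURCE B (Python) =====
-- def get_primary_face(faces, frame_h, frame_w):
--     # Sort by height descending (stable), then return the first in-bounds face.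
--     for face in sorted(faces, key=lambda f: f[3], reverse=True):
--         x1, y1, w, h = face
--         if h <= 0:
--             break
--         if x1 >= 0 and y1 >= 0 and x1 + w <= frame_w and y1 + h <= frame_h:
--             return face
--     return None
-- ===== Notes on version B (the rewrite author's own statement) =====
-- stated objective: alternative
-- what changed: Replaces A's single fused running-max scan with sort-then-scan: stable-sort the faces by height descending and return the first in-bounds face with positive height (breaking once heights drop to 0); stability of sorted preserves A's first-maximum tie-breaking.
import Mathlib
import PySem

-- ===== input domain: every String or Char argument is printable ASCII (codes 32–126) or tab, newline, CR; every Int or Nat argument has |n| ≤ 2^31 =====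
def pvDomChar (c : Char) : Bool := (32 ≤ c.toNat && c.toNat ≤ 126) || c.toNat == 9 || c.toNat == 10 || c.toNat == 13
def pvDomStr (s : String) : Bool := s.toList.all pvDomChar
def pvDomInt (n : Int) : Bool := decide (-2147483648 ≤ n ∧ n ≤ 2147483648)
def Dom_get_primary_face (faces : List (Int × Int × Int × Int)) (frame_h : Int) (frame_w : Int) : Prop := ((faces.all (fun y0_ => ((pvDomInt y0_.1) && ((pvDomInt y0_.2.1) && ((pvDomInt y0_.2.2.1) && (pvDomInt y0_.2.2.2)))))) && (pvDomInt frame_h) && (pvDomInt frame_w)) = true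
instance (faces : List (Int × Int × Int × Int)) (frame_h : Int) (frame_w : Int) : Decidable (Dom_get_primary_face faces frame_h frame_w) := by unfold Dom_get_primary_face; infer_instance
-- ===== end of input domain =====

-- B sorts the faces by height descending (stable) and returns the first in-bounds one (objective: alternative).
-- ===== PORT A =====
-- loop body of A: skip out-of-bounds faces, otherwise keep the strictly taller face
def pvStepA (frame_h frame_w : Int) (st : Option (Int × Int × Int × Int) × Int)
    (face : Int × Int × Int × Int) : Option (Int × Int × Int × Int) × Int :=
  let x1 := face.1; let y1 := face.2.1; let w := face.2.2.1; let h := face.2.2.2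
  let x2 := x1 + w; let y2 := y1 + h
  if x1 < 0 ∨ y1 < 0 ∨ x2 > frame_w ∨ y2 > frame_h then st
  else if h > st.2 then (some face, h) else st

def get_primary_face (faces : List (Int × Int × Int × Int)) (frame_h : Int) (frame_w : Int) : Option (Int × Int × Int × Int) :=
  (faces.foldl (pvStepA frame_h frame_w) (none, 0)).1

-- ===== PORT B =====
-- B's for-loop over the sorted list: break at h <= 0, return the first in-bounds face
def pvScanB (frame_h frame_w : Int) : List (Int × Int × Int × Int) → Option (Int × Int × Int × Int)
  | [] => none
  | face :: rest =>
    let x1 := face.1; let y1 := face.2.1; let w := face.2.2.1; let h := face.2.2.2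
    if h ≤ 0 then none
    else if 0 ≤ x1 ∧ 0 ≤ y1 ∧ x1 + w ≤ frame_w ∧ y1 + h ≤ frame_h then some face
    else pvScanB frame_h frame_w rest

def get_primary_face_alt (faces : List (Int × Int × Int × Int)) (frame_h : Int) (frame_w : Int) : Option (Int × Int × Int × Int) :=
  pvScanB frame_h frame_w (PySem.List.sorted faces (fun f => f.2.2.2) true)

-- ===== PRECONDITION & SPEC =====
def Spec_get_primary_face (faces : List (Int × Int × Int × Int)) (frame_h : Int) (frame_w : Int) (out : Option (Int × Int × Int × Int)) : Prop := out = get_primary_face_alt faces frame_h frame_w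
instance (faces : List (Int × Int × Int × Int)) (frame_h : Int) (frame_w : Int) (out : Option (Int × Int × Int × Int)) : Decidable (Spec_get_primary_face faces frame_h frame_w out) := by unfold Spec_get_primary_face; infer_instance

-- ===== CLAIM (what is proved, stated in full; the proofs are below) =====
def Claim_equal_get_primary_face : Prop := ∀ (faces : List (Int × Int × Int × Int)) (frame_h : Int) (frame_w : Int), Dom_get_primary_face faces frame_h frame_w → Spec_get_primary_face faces frame_h frame_w (get_primary_face faces frame_h frame_w)

-- ===== LEMMAS AND PROOFS =====

-- the in-bounds-and-positive-height test both programs apply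
def pvCand (frame_h frame_w : Int) (f : Int × Int × Int × Int) : Bool :=
  decide (0 ≤ f.1) && decide (0 ≤ f.2.1) &&
  decide (f.1 + f.2.2.1 ≤ frame_w) && decide (f.2.1 + f.2.2.2 ≤ frame_h) &&
  decide (0 < f.2.2.2)

-- "first maximum by height" step
def pvStepMax (acc : Option (Int × Int × Int × Int)) (x : Int × Int × Int × Int) : Option (Int × Int × Int × Int) :=
  match acc with
  | none => some x
  | some m => if m.2.2.2 < x.2.2.2 then some x else some m

-- A's loop invariant: the fold from a state (o, m), m the height recorded in o,
-- computes the first-max fold of the filtered list.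
lemma loop_eq (frame_h frame_w : Int) :
    ∀ (l : List (Int × Int × Int × Int)) (o : Option (Int × Int × Int × Int)) (m : Int),
      ((o = none ∧ m = 0) ∨ (∃ g, o = some g ∧ m = g.2.2.2 ∧ 0 < m)) →
      (l.foldl (pvStepA frame_h frame_w) (o, m)).1 =
        (l.filter (pvCand frame_h frame_w)).foldl pvStepMax o := by
  intro l
  induction l with
  | nil => intro o m _; rfl
  | cons f t ih =>
    intro o m hinv
    simp only [List.foldl_cons]
    by_cases hb : f.1 < 0 ∨ f.2.1 < 0 ∨ f.1 + f.2.2.1 > frame_w ∨ f.2.1 + f.2.2.2 > frame_h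
    · -- out of bounds: A skips, filter drops
      have hc : pvCand frame_h frame_w f = false := by
        simp only [pvCand]
        rcases hb with h | h | h | h <;> simp [not_le.mpr h]
      rw [List.filter_cons_of_neg (by simp [hc])]
      have : pvStepA frame_h frame_w (o, m) f = (o, m) := by
        simp only [pvStepA, if_pos hb]
      rw [this]
      exact ih o m hinv
    · push_neg at hb
      obtain ⟨hx1, hy1, hx2, hy2⟩ := hb
      have hstep : pvStepA frame_h frame_w (o, m) f =
          (if f.2.2.2 > m then ((some f, f.2.2.2) : Option (Int × Int × Int × Int) × Int) else (o, m)) := by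
        simp only [pvStepA]
        rw [if_neg]
        push_neg
        exact ⟨hx1, hy1, hx2, hy2⟩
      have hm0 : 0 ≤ m := by
        rcases hinv with ⟨_, hm⟩ | ⟨g, _, _, hm⟩ <;> omega
      by_cases hh : f.2.2.2 > m
      · have hpos : (0:Int) < f.2.2.2 := by omega
        have hc : pvCand frame_h frame_w f = true := by
          simp [pvCand, hx1, hy1, hx2, hy2, hpos]
        rw [List.filter_cons_of_pos hc, hstep, if_pos hh]
        have hsm : pvStepMax o f = some f := by
          rcases hinv with ⟨ho, _⟩ | ⟨g, ho, hg, _⟩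
          · rw [ho]; rfl
          · rw [ho]; simp only [pvStepMax]; rw [if_pos (by omega)]
        simp only [List.foldl_cons, hsm]
        exact ih (some f) f.2.2.2 (Or.inr ⟨f, rfl, rfl, hpos⟩)
      · rw [hstep, if_neg hh]
        by_cases hp : (0:Int) < f.2.2.2
        · have hc : pvCand frame_h frame_w f = true := by
            simp [pvCand, hx1, hy1, hx2, hy2, hp]
          rw [List.filter_cons_of_pos hc]
          have hm : 0 < m := by omega
          rcases hinv with ⟨_, hm0'⟩ | ⟨g, ho, hg, _⟩
          · omega
          · have hsm : pvStepMax o f = o := by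
              rw [ho]; simp only [pvStepMax]; rw [if_neg (by omega)]
            simp only [List.foldl_cons, hsm]
            exact ih o m (Or.inr ⟨g, ho, hg, hm⟩)
        · have hc : pvCand frame_h frame_w f = false := by
            simp [pvCand]; omega
          rw [List.filter_cons_of_neg (by simp [hc])]
          exact ih o m hinv

-- inserting x into a height-descending list: the first match shifts by exactly one pvStepMax step
lemma find?_insertBy (p : (Int × Int × Int × Int) → Bool) (x : Int × Int × Int × Int) :
    ∀ (S : List (Int × Int × Int × Int)),
      S.Pairwise (fun a b => b.2.2.2 ≤ a.2.2.2) →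
      (PySem.List.insertBy (fun a b => decide (b.2.2.2 < a.2.2.2)) x S).find? p =
        (if p x then pvStepMax (S.find? p) x else S.find? p) := by
  intro S
  induction S with
  | nil =>
    intro _
    by_cases hpx : p x = true
    · simp [PySem.List.insertBy, List.find?, hpx, pvStepMax]
    · simp [PySem.List.insertBy, List.find?, hpx]
  | cons y t ih =>
    intro hpair
    have hhd : ∀ z ∈ t, z.2.2.2 ≤ y.2.2.2 := fun z hz => List.rel_of_pairwise_cons hpair hz
    have htp : t.Pairwise (fun a b => b.2.2.2 ≤ a.2.2.2) := hpair.of_cons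
    by_cases hlt : y.2.2.2 < x.2.2.2
    · -- x goes in front
      have : PySem.List.insertBy (fun a b => decide (b.2.2.2 < a.2.2.2)) x (y :: t) = x :: y :: t := by
        simp [PySem.List.insertBy, hlt]
      rw [this]
      by_cases hpx : p x = true
      · rw [List.find?_cons_of_pos hpx, if_pos hpx]
        cases hf : (y :: t).find? p with
        | none => rfl
        | some m =>
          have hmem : m ∈ y :: t := List.mem_of_find?_eq_some hf
          have hmle : m.2.2.2 ≤ y.2.2.2 := by
            rcases List.mem_cons.mp hmem with h | h
            · rw [h]
            · exact hhd m h
          simp only [pvStepMax]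
          rw [if_pos (by omega)]
      · rw [List.find?_cons_of_neg (by simp [hpx]), if_neg (by simp [hpx])]
    · -- x goes after y
      have hins : PySem.List.insertBy (fun a b => decide (b.2.2.2 < a.2.2.2)) x (y :: t) =
          y :: PySem.List.insertBy (fun a b => decide (b.2.2.2 < a.2.2.2)) x t := by
        simp [PySem.List.insertBy, hlt]
      rw [hins]
      by_cases hpy : p y = true
      · rw [List.find?_cons_of_pos hpy, List.find?_cons_of_pos hpy]
        by_cases hpx : p x = true
        · rw [if_pos hpx]
          simp only [pvStepMax]
          rw [if_neg (by omega)]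
        · rw [if_neg (by simp [hpx])]
      · rw [List.find?_cons_of_neg (by simp [hpy]), List.find?_cons_of_neg (by simp [hpy])]
        exact ih htp

-- each sorted prefix extends by one insertBy step
lemma sorted_append_singleton (pre : List (Int × Int × Int × Int)) (x : Int × Int × Int × Int) :
    PySem.List.sorted (pre ++ [x]) (fun f => f.2.2.2) true =
      PySem.List.insertBy (fun a b => decide (b.2.2.2 < a.2.2.2)) x
        (PySem.List.sorted pre (fun f => f.2.2.2) true) := by
  rw [PySem.List.sorted_rev_eq_foldl_insertBy, PySem.List.sorted_rev_eq_foldl_insertBy,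
    List.foldl_append]
  rfl

-- main invariant: first match in the sorted prefix = first-max fold over the filtered suffix
lemma find?_sorted_foldl (p : (Int × Int × Int × Int) → Bool) :
    ∀ (xs pre : List (Int × Int × Int × Int)),
      (PySem.List.sorted (pre ++ xs) (fun f => f.2.2.2) true).find? p =
        (xs.filter p).foldl pvStepMax ((PySem.List.sorted pre (fun f => f.2.2.2) true).find? p) := by
  intro xs
  induction xs with
  | nil => intro pre; simp
  | cons x t ih =>
    intro pre
    have h1 : pre ++ x :: t = (pre ++ [x]) ++ t := by simp
    rw [h1, ih (pre ++ [x]), sorted_append_singleton pre x,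
      find?_insertBy p x _ (PySem.List.sorted_pairwise_rev pre (fun f => f.2.2.2))]
    by_cases hpx : p x = true
    · rw [List.filter_cons_of_pos hpx, if_pos hpx, List.foldl_cons]
    · rw [List.filter_cons_of_neg (by simp [hpx]), if_neg (by simp [hpx])]

-- B's scan with its break is find? pvCand on a height-descending list
lemma scan_eq_find? (frame_h frame_w : Int) :
    ∀ (S : List (Int × Int × Int × Int)),
      S.Pairwise (fun a b => b.2.2.2 ≤ a.2.2.2) →
      pvScanB frame_h frame_w S = S.find? (pvCand frame_h frame_w) := by
  intro S
  induction S with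
  | nil => intro _; rfl
  | cons f t ih =>
    intro hpair
    have hhd : ∀ z ∈ t, z.2.2.2 ≤ f.2.2.2 := fun z hz => List.rel_of_pairwise_cons hpair hz
    by_cases hle : f.2.2.2 ≤ 0
    · -- break: every remaining height is ≤ 0, so no candidate follows
      have : pvScanB frame_h frame_w (f :: t) = none := by
        simp [pvScanB, hle]
      rw [this]
      symm
      rw [List.find?_eq_none]
      intro z hz
      have hzle : z.2.2.2 ≤ 0 := by
        rcases List.mem_cons.mp hz with h | h
        · rw [h]; exact hle
        · have := hhd z h; omega
      simp [pvCand]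
      omega
    · push_neg at hle
      by_cases hin : 0 ≤ f.1 ∧ 0 ≤ f.2.1 ∧ f.1 + f.2.2.1 ≤ frame_w ∧ f.2.1 + f.2.2.2 ≤ frame_h
      · have hc : pvCand frame_h frame_w f = true := by
          simp [pvCand, hin.1, hin.2.1, hin.2.2.1, hin.2.2.2, hle]
        rw [List.find?_cons_of_pos hc]
        simp [pvScanB, not_le.mpr hle, hin]
      · have hc : pvCand frame_h frame_w f = false := by
          simp only [pvCand]
          simp only [not_and_or, not_le] at hin
          rcases hin with h | h | h | h <;> simp [not_le.mpr h]
        rw [List.find?_cons_of_neg (by simp [hc])]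
        have : pvScanB frame_h frame_w (f :: t) = pvScanB frame_h frame_w t := by
          simp [pvScanB, not_le.mpr hle, hin]
        rw [this]
        exact ih hpair.of_cons

-- ===== VERDICT (by name: the statement is the Claim_ definition above) =====
theorem get_primary_face_spec : Claim_equal_get_primary_face := by
  intro faces frame_h frame_w _
  unfold Spec_get_primary_face get_primary_face get_primary_face_alt
  rw [loop_eq frame_h frame_w faces none 0 (Or.inl ⟨rfl, rfl⟩),
    scan_eq_find? frame_h frame_w _ (PySem.List.sorted_pairwise_rev faces (fun f => f.2.2.2))]
  have := find?_sorted_foldl (pvCand frame_h frame_w) faces []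
  simp only [List.nil_append] at this
  rw [this]
  rfl
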